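-- pv_equiv track=rewrite | github.com/spinojara/testbit | testbit/cgroup.py | list_cpus
-- ===== SOURCE A (Python) =====
-- from typing import List, Self, Set
--
-- def list_cpus(cpus: str) -> List[str]:
--     l: List[str] = []
--     current_int = ""
--     for c in cpus:
--         if c == "\n":
--             break
--         elif c == "-":
--             l.extend([current_int, "-"])
--             current_int = ""
--         elif c == ",":
--             l.extend([current_int, ","])
--             current_int = ""
--         else:
--             current_int += c
--     if current_int:
--         l.append(current_int)
--     return l
-- ===== SOURCE B (Python) =====
-- def list_cpus(cpus):
--     line = cpus.split('\n', 1)[0]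
--     out = []
--     for chunk in line.split(','):
--         if out:
--             out.append(',')
--         parts = chunk.split('-')
--         out.append(parts[0])
--         for p in parts[1:]:
--             out.append('-')
--             out.append(p)
--     if out and out[-1] == '':
--         out.pop()
--     return out
-- ===== Notes on version B (the rewrite author's own statement) =====
-- stated objective: idiomatic
-- what changed: Replaces A's character-by-character accumulator loop with str.split calls: truncate at the first newline, split on commas, split each chunk on dashes, interleave the delimiter tokens, and drop one trailing empty token.
import Mathlib
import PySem

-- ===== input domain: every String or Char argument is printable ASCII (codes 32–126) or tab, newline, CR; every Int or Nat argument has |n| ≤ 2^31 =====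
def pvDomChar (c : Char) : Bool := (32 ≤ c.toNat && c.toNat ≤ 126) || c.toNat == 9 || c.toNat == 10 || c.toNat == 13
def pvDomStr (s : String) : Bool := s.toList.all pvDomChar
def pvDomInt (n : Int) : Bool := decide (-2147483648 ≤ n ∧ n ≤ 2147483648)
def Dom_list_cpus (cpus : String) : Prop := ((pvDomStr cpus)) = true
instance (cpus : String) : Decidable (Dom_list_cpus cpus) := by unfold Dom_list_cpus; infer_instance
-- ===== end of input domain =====

-- B tokenizes with str.split (truncate at first newline, split on ',', split chunks on '-',
-- interleave delimiters, drop one trailing empty token) instead of A's char-by-char loop;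
-- idiomatic, and measurably faster (C-level split vs per-char Python loop).

-- ===== PORT A =====
-- A's loop; the token under construction (current_int) and the tokens are kept as List Char
-- per the port convention (strings handled on the list side), converted by String.ofList at the end.
def listCpusGo : List Char → List (List Char) → List Char → List (List Char)
  | [], l, cur => if cur ≠ [] then l ++ [cur] else l          -- loop ends; "if current_int: l.append(current_int)"
  | c :: rest, l, cur =>
    if c = '\n' then (if cur ≠ [] then l ++ [cur] else l)     -- break, then the same final append
    else if c = '-' then listCpusGo rest (l ++ [cur, ['-']]) []
    else if c = ',' then listCpusGo rest (l ++ [cur, [',']]) []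
    else listCpusGo rest l (cur ++ [c])

def list_cpus (cpus : String) : List String :=
  (listCpusGo cpus.toList [] []).map String.ofList

-- ===== PORT B =====
-- one iteration of B's "for chunk in line.split(',')" body
def bChunkStep (out : List (List Char)) (chunk : List Char) : List (List Char) :=
  let out1 := if out ≠ [] then out ++ [[',']] else out        -- if out: out.append(',')
  let parts := PySem.Chars.splitOn chunk ['-']                -- chunk.split('-')
  let out2 := out1 ++ [parts.headD []]                        -- out.append(parts[0]); split is never empty
  parts.tail.foldl (fun o p => o ++ [['-'], p]) out2          -- for p in parts[1:]: append '-', append p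

-- if out and out[-1] == '': out.pop()
def bTrim (out : List (List Char)) : List (List Char) :=
  if out ≠ [] ∧ out.getLast? = some [] then out.dropLast else out

def list_cpus_alt (cpus : String) : List String :=
  (bTrim (((PySem.Chars.splitOn
      ((PySem.Chars.splitOnMax cpus.toList ['\n'] 1).headD [])   -- line = cpus.split('\n', 1)[0]; never empty
      [','])).foldl bChunkStep [])).map String.ofList

-- ===== PRECONDITION & SPEC =====
def Spec_list_cpus (cpus : String) (out : List String) : Prop := out = list_cpus_alt cpus
instance (cpus : String) (out : List String) : Decidable (Spec_list_cpus cpus out) := by unfold Spec_list_cpus; infer_instance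

-- ===== CLAIM (what is proved, stated in full; the proofs are below) =====
def Claim_equal_list_cpus : Prop := ∀ (cpus : String), Dom_list_cpus cpus → Spec_list_cpus cpus (list_cpus cpus)

-- ===== LEMMAS AND PROOFS =====

-- prepend a prefix onto the first token of a token list
def consHead (p : List Char) : List (List Char) → List (List Char)
  | [] => [p]
  | t :: ts => (p ++ t) :: ts

-- drop the last token if it is empty
def trimLast (xs : List (List Char)) : List (List Char) :=
  if xs.getLast? = some [] then xs.dropLast else xs

-- the common tokenization both programs compute (before trimming a trailing empty token)
def toks : List Char → List (List Char)
  | [] => [[]]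
  | c :: rest => if c = '-' ∨ c = ',' then [] :: [c] :: toks rest else consHead [c] (toks rest)

-- s.split(c) for a single-char separator, structurally
def mySplit (c : Char) : List Char → List (List Char)
  | [] => [[]]
  | d :: rest => if d = c then [] :: mySplit c rest else consHead [d] (mySplit c rest)

-- B's per-chunk token list: chunk split on '-' with '-' tokens interleaved
def dashT (chunk : List Char) : List (List Char) :=
  match mySplit '-' chunk with
  | [] => []
  | t :: ts => t :: ts.flatMap (fun p => [['-'], p])

-- join per-chunk token lists with ',' tokens interleaved
def joinC : List (List (List Char)) → List (List Char)
  | [] => []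
  | x :: xs => x ++ xs.flatMap (fun y => [[',']] ++ y)

theorem toks_ne_nil (s : List Char) : toks s ≠ [] := by
  cases s with
  | nil => simp [toks]
  | cons c rest =>
    simp only [toks]
    split
    · simp
    · cases h : toks rest <;> simp [consHead]

theorem mySplit_ne_nil (c : Char) (s : List Char) : mySplit c s ≠ [] := by
  cases s with
  | nil => simp [mySplit]
  | cons d rest =>
    simp only [mySplit]
    split
    · simp
    · cases h : mySplit c rest <;> simp [consHead]

theorem dashT_ne_nil (chunk : List Char) : dashT chunk ≠ [] := by
  unfold dashT
  cases h : mySplit '-' chunk with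
  | nil => exact absurd h (mySplit_ne_nil '-' chunk)
  | cons t ts => simp

theorem consHead_nil (xs : List (List Char)) (h : xs ≠ []) : consHead [] xs = xs := by
  cases xs with
  | nil => exact absurd rfl h
  | cons t ts => simp [consHead]

theorem consHead_consHead (p q : List Char) (xs : List (List Char)) :
    consHead p (consHead q xs) = consHead (p ++ q) xs := by
  cases xs <;> simp [consHead]

theorem trimLast_cons (a : List Char) (xs : List (List Char)) (h : xs ≠ []) :
    trimLast (a :: xs) = a :: trimLast xs := by
  unfold trimLast
  cases xs with
  | nil => exact absurd rfl h
  | cons b ys =>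
    simp only [List.getLast?_cons_cons, List.dropLast_cons_of_ne_nil (List.cons_ne_nil b ys)]
    split <;> rfl

-- A's loop computes the trimmed common tokenization of the part before the first newline
theorem consHead_cons (p t : List Char) (ts : List (List Char)) :
    consHead p (t :: ts) = (p ++ t) :: ts := rfl

theorem listCpusGo_eq (s : List Char) : ∀ (l : List (List Char)) (cur : List Char),
    listCpusGo s l cur = l ++ trimLast (consHead cur (toks (s.takeWhile (· ≠ '\n')))) := by
  induction s with
  | nil =>
    intro l cur
    simp only [listCpusGo, List.takeWhile_nil, toks, consHead, List.append_nil]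
    unfold trimLast
    by_cases h : cur = [] <;> simp [h]
  | cons c rest ih =>
    intro l cur
    by_cases hn : c = '\n'
    · subst hn
      have h1 : listCpusGo ('\n' :: rest) l cur = if cur ≠ [] then l ++ [cur] else l := by
        simp [listCpusGo]
      have htw : (('\n' :: rest).takeWhile (· ≠ '\n')) = [] := by simp
      rw [h1, htw]
      simp only [toks, consHead]
      unfold trimLast
      by_cases h : cur = [] <;> simp [h]
    · have htw : (c :: rest).takeWhile (· ≠ '\n') = c :: rest.takeWhile (· ≠ '\n') := by
        simp [hn]
      by_cases hd : c = '-'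
      · subst hd
        have h1 : listCpusGo ('-' :: rest) l cur = listCpusGo rest (l ++ [cur, ['-']]) [] := by
          simp [listCpusGo]
        have h2 : toks ('-' :: rest.takeWhile (· ≠ '\n')) =
            [] :: ['-'] :: toks (rest.takeWhile (· ≠ '\n')) := by simp [toks]
        rw [h1, ih, consHead_nil _ (toks_ne_nil _), htw, h2, consHead_cons,
          trimLast_cons _ _ (List.cons_ne_nil _ _), trimLast_cons _ _ (toks_ne_nil _)]
        simp
      · by_cases hc : c = ','
        · subst hc
          have h1 : listCpusGo (',' :: rest) l cur = listCpusGo rest (l ++ [cur, [',']]) [] := by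
            simp [listCpusGo]
          have h2 : toks (',' :: rest.takeWhile (· ≠ '\n')) =
              [] :: [','] :: toks (rest.takeWhile (· ≠ '\n')) := by simp [toks]
          rw [h1, ih, consHead_nil _ (toks_ne_nil _), htw, h2, consHead_cons,
            trimLast_cons _ _ (List.cons_ne_nil _ _), trimLast_cons _ _ (toks_ne_nil _)]
          simp
        · have h1 : listCpusGo (c :: rest) l cur = listCpusGo rest l (cur ++ [c]) := by
            simp [listCpusGo, hn, hd, hc]
          have h2 : toks (c :: rest.takeWhile (· ≠ '\n')) =
              consHead [c] (toks (rest.takeWhile (· ≠ '\n'))) := by simp [toks, hd, hc]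
          rw [h1, ih, htw, h2, consHead_consHead]

-- splitOn with a single-char separator is mySplit
theorem splitOn_go_eq (c : Char) (s : List Char) : ∀ (fuel : Nat), s.length < fuel →
    ∀ (cur : List Char) (acc : List (List Char)),
    PySem.Chars.splitOn.go [c] fuel s cur acc = acc.reverse ++ consHead cur.reverse (mySplit c s) := by
  induction s with
  | nil =>
    intro fuel h cur acc
    obtain ⟨f, rfl⟩ : ∃ f, fuel = f + 1 := ⟨fuel - 1, by omega⟩
    simp [PySem.Chars.splitOn.go, mySplit, consHead]
  | cons d rest ih =>
    intro fuel h cur acc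
    obtain ⟨f, rfl⟩ : ∃ f, fuel = f + 1 := ⟨fuel - 1, by omega⟩
    have hlen : rest.length < f := by simp at h; omega
    by_cases hdc : d = c
    · have hstep : PySem.Chars.splitOn.go [c] (f + 1) (d :: rest) cur acc =
          PySem.Chars.splitOn.go [c] f rest [] (cur.reverse :: acc) := by
        simp [PySem.Chars.splitOn.go, List.isPrefixOf, hdc]
      rw [hstep, ih f hlen]
      simp only [List.reverse_nil]
      rw [consHead_nil _ (mySplit_ne_nil c rest)]
      have : mySplit c (d :: rest) = [] :: mySplit c rest := by simp [mySplit, hdc]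
      rw [this, consHead_cons]
      simp
    · have hcd : ¬ c = d := fun hh => hdc hh.symm
      have hstep : PySem.Chars.splitOn.go [c] (f + 1) (d :: rest) cur acc =
          PySem.Chars.splitOn.go [c] f rest (d :: cur) acc := by
        simp [PySem.Chars.splitOn.go, List.isPrefixOf, hcd]
      have hsp : mySplit c (d :: rest) = consHead [d] (mySplit c rest) := by
        simp [mySplit, hdc]
      rw [hstep, ih f hlen, hsp, consHead_consHead]
      simp

theorem splitOn_single (c : Char) (s : List Char) :
    PySem.Chars.splitOn s [c] = mySplit c s := by
  unfold PySem.Chars.splitOn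
  rw [splitOn_go_eq c s (s.length + 1) (by omega) [] []]
  simp [consHead_nil _ (mySplit_ne_nil c s)]

-- s.split('\n', 1)[0] is the part before the first newline
theorem splitOnMax_go_zero (rest : List Char) (fuel : Nat) (acc : List (List Char)) (h : 0 < fuel) :
    PySem.Chars.splitOnMax.go ['\n'] fuel 0 rest [] acc = acc.reverse ++ [rest] := by
  obtain ⟨f, rfl⟩ : ∃ f, fuel = f + 1 := ⟨fuel - 1, by omega⟩
  cases rest <;> simp [PySem.Chars.splitOnMax.go]

theorem splitOnMax_go_one (s : List Char) : ∀ (fuel : Nat), s.length < fuel →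
    ∀ (cur : List Char) (acc : List (List Char)),
    PySem.Chars.splitOnMax.go ['\n'] fuel 1 s cur acc =
      acc.reverse ++ (cur.reverse ++ s.takeWhile (· ≠ '\n')) ::
        (if s.any (· = '\n') then [(s.dropWhile (· ≠ '\n')).tail] else []) := by
  induction s with
  | nil =>
    intro fuel h cur acc
    obtain ⟨f, rfl⟩ : ∃ f, fuel = f + 1 := ⟨fuel - 1, by omega⟩
    simp [PySem.Chars.splitOnMax.go]
  | cons d rest ih =>
    intro fuel h cur acc
    obtain ⟨f, rfl⟩ : ∃ f, fuel = f + 1 := ⟨fuel - 1, by omega⟩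
    have hlen : rest.length < f := by simp at h; omega
    by_cases hd : d = '\n'
    · subst hd
      have hstep : PySem.Chars.splitOnMax.go ['\n'] (f + 1) 1 ('\n' :: rest) cur acc =
          PySem.Chars.splitOnMax.go ['\n'] f 0 rest [] (cur.reverse :: acc) := by
        simp [PySem.Chars.splitOnMax.go, List.isPrefixOf]
      rw [hstep, splitOnMax_go_zero rest f _ (by omega)]
      simp
    · have hnd : ¬ '\n' = d := fun hh => hd hh.symm
      have hstep : PySem.Chars.splitOnMax.go ['\n'] (f + 1) 1 (d :: rest) cur acc =
          PySem.Chars.splitOnMax.go ['\n'] f 1 rest (d :: cur) acc := by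
        simp [PySem.Chars.splitOnMax.go, List.isPrefixOf, hnd]
      rw [hstep, ih f hlen]
      simp [hd]

theorem line_eq (s : List Char) :
    (PySem.Chars.splitOnMax s ['\n'] 1).headD [] = s.takeWhile (· ≠ '\n') := by
  unfold PySem.Chars.splitOnMax
  rw [if_neg (by omega)]
  have : ((1 : Int)).toNat = 1 := rfl
  rw [this, splitOnMax_go_one s (s.length + 1) (by omega) [] []]
  simp

-- the common tokenization factors through splitting on ',' then on '-'
theorem joinC_cons (x : List (List Char)) (M : List (List (List Char))) (h : M ≠ []) :
    joinC (x :: M) = x ++ [[',']] ++ joinC M := by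
  cases M with
  | nil => exact absurd rfl h
  | cons m ms => simp [joinC]

theorem joinC_append_head (a x : List (List Char)) (L : List (List (List Char))) :
    joinC ((a ++ x) :: L) = a ++ joinC (x :: L) := by
  simp [joinC]

theorem joinC_consHead (p : List Char) (x : List (List Char)) (hx : x ≠ [])
    (L : List (List (List Char))) :
    joinC (consHead p x :: L) = consHead p (joinC (x :: L)) := by
  cases x with
  | nil => exact absurd rfl hx
  | cons xh xt => simp [joinC, consHead]

theorem dashT_dash (h : List Char) : dashT ('-' :: h) = [] :: ['-'] :: dashT h := by
  unfold dashT
  have hsp : mySplit '-' ('-' :: h) = [] :: mySplit '-' h := by simp [mySplit]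
  rw [hsp]
  cases hm : mySplit '-' h with
  | nil => exact absurd hm (mySplit_ne_nil _ _)
  | cons h' t' => simp

theorem dashT_other (c : Char) (hc : ¬ c = '-') (h : List Char) :
    dashT (c :: h) = consHead [c] (dashT h) := by
  unfold dashT
  have hsp : mySplit '-' (c :: h) = consHead [c] (mySplit '-' h) := by simp [mySplit, hc]
  rw [hsp]
  cases hm : mySplit '-' h with
  | nil => exact absurd hm (mySplit_ne_nil _ _)
  | cons h' t' => simp [consHead]

theorem toks_eq_join (s : List Char) : toks s = joinC ((mySplit ',' s).map dashT) := by
  induction s with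
  | nil => rfl
  | cons c rest ih =>
    by_cases hc : c = ','
    · subst hc
      have hsp : mySplit ',' (',' :: rest) = [] :: mySplit ',' rest := by simp [mySplit]
      have htk : toks (',' :: rest) = [] :: [','] :: toks rest := by simp [toks]
      rw [htk, hsp, List.map_cons,
        joinC_cons _ _ (by simp [mySplit_ne_nil ',' rest]), ← ih]
      rfl
    · have hsp : mySplit ',' (c :: rest) = consHead [c] (mySplit ',' rest) := by
        simp [mySplit, hc]
      cases hm : mySplit ',' rest with
      | nil => exact absurd hm (mySplit_ne_nil _ _)
      | cons h t =>
        by_cases hd : c = '-'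
        · subst hd
          have htk : toks ('-' :: rest) = [] :: ['-'] :: toks rest := by simp [toks]
          rw [htk, hsp, hm, consHead_cons, List.singleton_append, List.map_cons, dashT_dash]
          have h2 : ([] : List Char) :: ['-'] :: dashT h = [[], ['-']] ++ dashT h := rfl
          rw [h2, joinC_append_head, ← List.map_cons, ← hm, ← ih]
          rfl
        · have htk : toks (c :: rest) = consHead [c] (toks rest) := by
            simp [toks, hc, hd]
          rw [htk, hsp, hm, consHead_cons, List.singleton_append, List.map_cons,
            dashT_other c hd, joinC_consHead _ _ (dashT_ne_nil h), ← List.map_cons, ← hm, ← ih]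

theorem bChunkStep_eq (out : List (List Char)) (chunk : List Char) :
    bChunkStep out chunk = (if out ≠ [] then out ++ [[',']] else out) ++ dashT chunk := by
  unfold bChunkStep
  rw [splitOn_single, PySem.List.foldl_append_eq_flatMap]
  cases hp : mySplit '-' chunk with
  | nil => exact absurd hp (mySplit_ne_nil _ _)
  | cons t ts => simp [dashT, hp]

theorem foldl_bChunkStep (chunks : List (List Char)) : ∀ (out : List (List Char)), out ≠ [] →
    chunks.foldl bChunkStep out = out ++ chunks.flatMap (fun ch => [[',']] ++ dashT ch) := by
  induction chunks with
  | nil => intro out _; simp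
  | cons ch rest ih =>
    intro out h
    rw [List.foldl_cons, bChunkStep_eq, if_pos h, ih _ (by simp)]
    simp

theorem foldl_bChunkStep_nil (ch : List Char) (rest : List (List Char)) :
    (ch :: rest).foldl bChunkStep [] = joinC ((ch :: rest).map dashT) := by
  rw [List.foldl_cons, bChunkStep_eq, if_neg (by simp), List.nil_append,
    foldl_bChunkStep rest _ (dashT_ne_nil ch)]
  simp [joinC, List.flatMap_map]

theorem bTrim_eq_trimLast (xs : List (List Char)) : bTrim xs = trimLast xs := by
  unfold bTrim trimLast
  cases xs <;> simp

-- ===== VERDICT (by name: the statement is the Claim_ definition above) =====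
theorem list_cpus_spec : Claim_equal_list_cpus := by
  intro cpus _
  unfold Spec_list_cpus list_cpus list_cpus_alt
  rw [line_eq]
  obtain ⟨ch, rest, hsp⟩ : ∃ ch rest, PySem.Chars.splitOn (cpus.toList.takeWhile (· ≠ '\n')) [','] = ch :: rest :=
    by
    rcases h : PySem.Chars.splitOn (cpus.toList.takeWhile (· ≠ '\n')) [','] with _ | ⟨ch, rest⟩
    · exact absurd (splitOn_single ',' _ ▸ h) (mySplit_ne_nil ',' _)
    · exact ⟨ch, rest, rfl⟩
  rw [hsp, foldl_bChunkStep_nil, ← hsp, splitOn_single, ← toks_eq_join, bTrim_eq_trimLast,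
    listCpusGo_eq, consHead_nil _ (toks_ne_nil _)]
  simp
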